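-- pv_equiv track=rewrite | github.com/sravez/dauphine | Info/code/EXTP/TP/TP2/EX_2.19.py | s1
-- ===== SOURCE A (Python) =====
-- def s1(n: int) -> int:
--     s = 0
--     red = 1
--     while red <=6:
--         green = 1
--         while green <=8:
--             blue = 1
--             while blue <=10:
--                 if red + green + blue == n:
--                     s += 1
--                     break
--                 blue += 1
--             green +=1
--         red += 1
--     return s
-- ===== SOURCE B (Python) =====
-- def s1(n: int) -> int:
--     # simpler: closed-form inner test, blue = n - red - green must lie in 1..10
--     return sum(1 if 1 <= n - red - green <= 10 else 0
--                for red in range(1, 7) for green in range(1, 9))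
-- ===== Notes on version B (the rewrite author's own statement) =====
-- stated objective: simpler
-- what changed: Replaced the innermost scan over blue (with break) by a closed-form range test on blue = n - red - green inside the two outer loops.
import Mathlib
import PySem

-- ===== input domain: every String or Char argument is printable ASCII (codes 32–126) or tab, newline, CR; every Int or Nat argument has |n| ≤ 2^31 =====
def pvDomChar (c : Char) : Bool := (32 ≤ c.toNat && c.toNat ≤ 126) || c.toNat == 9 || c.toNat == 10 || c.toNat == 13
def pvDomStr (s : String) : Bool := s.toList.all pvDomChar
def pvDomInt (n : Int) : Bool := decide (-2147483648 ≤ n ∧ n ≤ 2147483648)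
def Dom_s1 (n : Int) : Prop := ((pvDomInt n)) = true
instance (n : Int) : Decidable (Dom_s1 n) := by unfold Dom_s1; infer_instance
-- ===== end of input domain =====

-- B replaces the innermost blue scan by a closed-form range test on blue = n - red - green (simpler).


-- ===== PORT A =====
-- Each `while` is structural recursion on a Nat fuel that only bounds the iteration count
-- (the loop variable starts at 1 and the guard stops it, so the fuel is never exhausted);
-- the guard, body and update are the Python's, step for step.
-- innermost: while blue <= 10: if red+green+blue == n: s += 1; break; blue += 1
-- (returns the increment the break contributes: 1 on a hit, else 0)
def s1WhileBlue (n red green blue : Int) : Nat → Int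
  | 0 => 0
  | fuel + 1 =>
    if blue ≤ 10 then
      if red + green + blue = n then 1
      else s1WhileBlue n red green (blue + 1) fuel
    else 0

-- while green <= 8, accumulator s
def s1WhileGreen (n red green s : Int) : Nat → Int
  | 0 => s
  | fuel + 1 =>
    if green ≤ 8 then
      s1WhileGreen n red (green + 1) (s + s1WhileBlue n red green 1 10) fuel
    else s

-- while red <= 6, accumulator s
def s1WhileRed (n red s : Int) : Nat → Int
  | 0 => s
  | fuel + 1 =>
    if red ≤ 6 then
      s1WhileRed n (red + 1) (s1WhileGreen n red 1 s 8) fuel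
    else s

def s1 (n : Int) : Int := s1WhileRed n 1 0 6

-- ===== PORT B =====
def s1_alt (n : Int) : Int :=
  (((PySem.List.pyRange 1 7 1).flatMap fun red =>
      (PySem.List.pyRange 1 9 1).map fun green =>
        if 1 ≤ n - red - green ∧ n - red - green ≤ 10 then (1 : Int) else 0)).sum

-- ===== PRECONDITION & SPEC =====
def Spec_s1 (n : Int) (out : Int) : Prop := out = s1_alt n
instance (n : Int) (out : Int) : Decidable (Spec_s1 n out) := by unfold Spec_s1; infer_instance

-- ===== CLAIM (what is proved, stated in full; the proofs are below) =====
def Claim_equal_s1 : Prop := ∀ (n : Int), Dom_s1 n → Spec_s1 n (s1 n)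

-- ===== LEMMAS AND PROOFS =====
theorem s1WhileBlue_eq (n red green : Int) (fuel : Nat) (blue : Int)
    (h : (11 - blue).toNat ≤ fuel) :
    s1WhileBlue n red green blue fuel =
      if blue ≤ n - red - green ∧ n - red - green ≤ 10 then 1 else 0 := by
  induction fuel generalizing blue with
  | zero => rw [s1WhileBlue]; split_ifs <;> omega
  | succ fuel ih =>
      rw [s1WhileBlue]
      by_cases hb : blue ≤ 10
      · by_cases hh : red + green + blue = n
        · simp only [hb, hh, if_true]; split_ifs <;> omega
        · simp only [hb, hh, if_true, if_false]
          rw [ih (blue + 1) (by omega)]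
          split_ifs <;> omega
      · simp only [hb, if_false]; split_ifs <;> omega

theorem s1WhileGreen_eq (n red : Int) (fuel : Nat) (green s : Int)
    (h : (9 - green).toNat ≤ fuel) :
    s1WhileGreen n red green s fuel =
      s + (((PySem.List.pyRange green 9 1).map fun g =>
        if 1 ≤ n - red - g ∧ n - red - g ≤ 10 then (1 : Int) else 0)).sum := by
  induction fuel generalizing green s with
  | zero =>
      have h0 : PySem.List.pyRange green 9 1 = [] := by
        rw [PySem.List.pyRange_one]
        simp [show (9 - green).toNat = 0 by omega]
      rw [s1WhileGreen]; simp [h0]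
  | succ fuel ih =>
      rw [s1WhileGreen]
      by_cases hg : green ≤ 8
      · simp only [hg, if_true]
        rw [ih (green + 1) _ (by omega),
            PySem.List.pyRange_one_cons (by omega : green < 9),
            s1WhileBlue_eq n red green 10 1 (by omega)]
        simp; ring
      · have h0 : PySem.List.pyRange green 9 1 = [] := by
          rw [PySem.List.pyRange_one]
          simp [show (9 - green).toNat = 0 by omega]
        simp [hg, h0]

theorem s1WhileRed_eq (n : Int) (fuel : Nat) (red s : Int)
    (h : (7 - red).toNat ≤ fuel) :
    s1WhileRed n red s fuel =
      s + (((PySem.List.pyRange red 7 1).flatMap fun r =>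
        (PySem.List.pyRange 1 9 1).map fun green =>
          if 1 ≤ n - r - green ∧ n - r - green ≤ 10 then (1 : Int) else 0)).sum := by
  induction fuel generalizing red s with
  | zero =>
      have h0 : PySem.List.pyRange red 7 1 = [] := by
        rw [PySem.List.pyRange_one]
        simp [show (7 - red).toNat = 0 by omega]
      rw [s1WhileRed]; simp [h0]
  | succ fuel ih =>
      rw [s1WhileRed]
      by_cases hr : red ≤ 6
      · simp only [hr, if_true]
        rw [ih (red + 1) _ (by omega),
            s1WhileGreen_eq n red 8 1 s (by omega),
            PySem.List.pyRange_one_cons (by omega : red < 7)]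
        simp [List.flatMap_cons, List.sum_append]; ring
      · have h0 : PySem.List.pyRange red 7 1 = [] := by
          rw [PySem.List.pyRange_one]
          simp [show (7 - red).toNat = 0 by omega]
        simp [hr, h0]

-- ===== VERDICT (by name: the statement is the Claim_ definition above) =====
theorem s1_spec : Claim_equal_s1 := by
  intro n _
  show s1 n = s1_alt n
  rw [s1, s1_alt, s1WhileRed_eq n 6 1 0 (by omega)]
  ring
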